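-- pv_equiv track=rewrite | github.com/KR8MER/eas-station | app_utils/eas_decode.py | _vote_on_bytes
-- ===== SOURCE A (Python) =====
-- from typing import Dict, Iterable, List, Optional, Sequence, Tuple
--
-- def _vote_on_bytes(burst_bytes: List[List[int]]) -> List[int]:
--     """Perform 2-out-of-3 majority voting on byte sequences from multiple bursts."""
--
--     if not burst_bytes:
--         return []
--
--     # Find the maximum length among all bursts
--     max_len = max(len(burst) for burst in burst_bytes)
--     voted_bytes: List[int] = []
--
--     for pos in range(max_len):
--         # Collect byte values at this position from all bursts
--         candidates: List[int] = []
--         for burst in burst_bytes: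
--             if pos < len(burst):
--                 candidates.append(burst[pos])
--
--         if not candidates:
--             continue
--
--         # Perform majority voting
--         if len(candidates) == 1:
--             voted_bytes.append(candidates[0])
--         elif len(candidates) == 2:
--             # With 2 candidates, take the first one (or could average)
--             voted_bytes.append(candidates[0])
--         else:
--             # With 3 candidates, find the majority
--             # Count occurrences
--             from collections import Counter
--             counts = Counter(candidates)
--             most_common = counts.most_common(1)[0]
--
--             # If there's a clear majority (at least 2), use it
--             if most_common[1] >= 2:
--                 voted_bytes.append(most_common[0])
--             else:
--                 # No majority, take the first one
--                 voted_bytes.append(candidates[0])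
--
--     return voted_bytes
-- ===== SOURCE B (Python) =====
-- def _vote_on_bytes(burst_bytes):
--     """Row-major tallying: one pass over the bursts builds a value->count dict per
--     byte position (insertion order = first-seen order), then each position's winner
--     is simply the first key with the maximal count."""
--     tallies = []  # tallies[pos]: dict mapping byte value -> occurrence count
--     for burst in burst_bytes:
--         if len(tallies) < len(burst):
--             tallies.extend({} for _ in range(len(burst) - len(tallies)))
--         for t, v in zip(tallies, burst):
--             t[v] = t.get(v, 0) + 1
--     return [max(t, key=t.get) for t in tallies]
-- ===== Notes on version B (the rewrite author's own statement) =====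
-- stated objective: alternative
-- what changed: Replaces A's column-wise scan (range(max_len) with an inner per-burst index loop, then a 1/2/3-candidate branch cascade over Counter) by a row-major single pass that incrementally builds one value->count dict per position, and picks each position's result with a single uniform argmax (first key with maximal count), since A's 'first candidate' fallback is exactly the first-seen key when the maximal count is 1.
import Mathlib
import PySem

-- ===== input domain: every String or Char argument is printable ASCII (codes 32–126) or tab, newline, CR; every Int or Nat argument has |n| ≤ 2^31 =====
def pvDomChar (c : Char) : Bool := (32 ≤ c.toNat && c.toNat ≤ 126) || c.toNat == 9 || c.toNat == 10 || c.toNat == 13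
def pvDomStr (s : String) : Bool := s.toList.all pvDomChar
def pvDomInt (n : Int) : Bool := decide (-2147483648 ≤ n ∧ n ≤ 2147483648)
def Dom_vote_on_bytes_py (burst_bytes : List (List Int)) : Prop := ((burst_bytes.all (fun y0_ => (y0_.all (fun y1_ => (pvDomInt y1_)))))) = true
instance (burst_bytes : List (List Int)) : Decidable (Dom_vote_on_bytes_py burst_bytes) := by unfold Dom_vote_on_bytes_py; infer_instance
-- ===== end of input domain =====

-- B replaces A's column-wise range(max_len) scan and 1/2/3-candidate cascade by a row-major
-- single pass building one value->count dict per position, then one uniform argmax per position;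
-- objective: alternative decomposition, same cost.

-- ===== PORT A =====
-- Counter(xs).most_common(1)[0]: first (insertion-order) pair with maximal count; (0,0) unreachable (xs ≠ []).
def pyMostCommon1 (xs : List Int) : Int × Int :=
  match (PySem.Dict.counter xs).items with
  | [] => (0, 0)
  | p :: ps => ps.foldl (fun best q => if best.2 < q.2 then q else best) p

def vote_on_bytes_py (burst_bytes : List (List Int)) : List Int :=
  if burst_bytes = [] then []
  else
    let maxLen : Nat := (burst_bytes.map (fun b => b.length)).foldl Nat.max 0
    (List.range maxLen).foldl (fun voted pos =>
      let candidates : List Int :=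
        burst_bytes.foldl (fun cs burst =>
          if pos < burst.length then cs ++ [burst.getD pos 0] else cs) []
      if candidates = [] then voted
      else if candidates.length = 1 then voted ++ [candidates.headD 0]
      else if candidates.length = 2 then voted ++ [candidates.headD 0]
      else if (pyMostCommon1 candidates).2 ≥ 2 then voted ++ [(pyMostCommon1 candidates).1]
      else voted ++ [candidates.headD 0]) []

-- ===== PORT B =====
-- t[v] = t.get(v, 0) + 1
def pvUpdate (t : PySem.Dict Int Int) (v : Int) : PySem.Dict Int Int :=
  t.insert v (t.getD v 0 + 1)

-- one burst of Source B's outer loop: pad tallies with fresh {} up to len(burst), then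
-- 'for t, v in zip(tallies, burst): t[v] = t.get(v,0)+1' — the in-place mutation of the
-- zipped prefix is modeled as zipWith on the prefix, the untouched suffix kept by drop.
def pvAddBurst (tallies : List (PySem.Dict Int Int)) (burst : List Int) : List (PySem.Dict Int Int) :=
  let padded := tallies ++ List.replicate (burst.length - tallies.length) PySem.Dict.empty
  List.zipWith pvUpdate padded burst ++ padded.drop burst.length

-- max(t, key=t.get): first key of t with maximal count (Python max keeps the earlier
-- element on ties); 0 unreachable (every tally dict is nonempty).
def pyArgmax (t : PySem.Dict Int Int) : Int :=
  match t.items with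
  | [] => 0
  | p :: ps => (ps.foldl (fun best q => if best.2 < q.2 then q else best) p).1

def vote_on_bytes_py_alt (burst_bytes : List (List Int)) : List Int :=
  (burst_bytes.foldl pvAddBurst []).map pyArgmax

-- ===== PRECONDITION & SPEC =====
def Spec_vote_on_bytes_py (burst_bytes : List (List Int)) (out : List Int) : Prop := out = vote_on_bytes_py_alt burst_bytes
instance (burst_bytes : List (List Int)) (out : List Int) : Decidable (Spec_vote_on_bytes_py burst_bytes out) := by unfold Spec_vote_on_bytes_py; infer_instance

-- ===== CLAIM (what is proved, stated in full; the proofs are below) =====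
def Claim_equal_vote_on_bytes_py : Prop := ∀ (burst_bytes : List (List Int)), Dom_vote_on_bytes_py burst_bytes → Spec_vote_on_bytes_py burst_bytes (vote_on_bytes_py burst_bytes)

-- ===== LEMMAS AND PROOFS =====

def pvCand (bb : List (List Int)) (pos : Nat) : List Int :=
  bb.filterMap (fun b => b[pos]?)

def pvMaxLen (bb : List (List Int)) : Nat := (bb.map (fun b => b.length)).foldl Nat.max 0

def pvTallies (bb : List (List Int)) : List (PySem.Dict Int Int) :=
  (List.range (pvMaxLen bb)).map (fun pos => PySem.Dict.counter (pvCand bb pos))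

def pvVoteA (c : List Int) : List Int :=
  if c = [] then []
  else if c.length = 1 then [c.headD 0]
  else if c.length = 2 then [c.headD 0]
  else if (pyMostCommon1 c).2 ≥ 2 then [(pyMostCommon1 c).1]
  else [c.headD 0]

theorem counter_snoc (c : List Int) (v : Int) :
    PySem.Dict.counter (c ++ [v]) = pvUpdate (PySem.Dict.counter c) v := by
  rw [← PySem.Dict.foldl_insert_getD_add_one_eq_counter, List.foldl_append,
    PySem.Dict.foldl_insert_getD_add_one_eq_counter]
  rfl

theorem le_foldl_max (l : List Nat) (a : Nat) :
    a ≤ l.foldl Nat.max a ∧ ∀ x ∈ l, x ≤ l.foldl Nat.max a := by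
  induction l generalizing a with
  | nil => simp
  | cons y t ih =>
    obtain ⟨h1, h2⟩ := ih (Nat.max a y)
    refine ⟨le_trans (Nat.le_max_left a y) h1, ?_⟩
    intro x hx
    rcases List.mem_cons.1 hx with rfl | hx
    · exact le_trans (Nat.le_max_right a x) h1
    · exact h2 x hx

theorem foldl_max_le (l : List Nat) (a n : Nat) (ha : a ≤ n) (h : ∀ x ∈ l, x ≤ n) :
    l.foldl Nat.max a ≤ n := by
  induction l generalizing a with
  | nil => simpa
  | cons y t ih =>
    exact ih (Nat.max a y) (Nat.max_le.2 ⟨ha, h y (List.mem_cons_self)⟩)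
      (fun x hx => h x (List.mem_cons_of_mem _ hx))

theorem length_le_maxLen (bb : List (List Int)) (b : List Int) (hb : b ∈ bb) :
    b.length ≤ pvMaxLen bb := by
  unfold pvMaxLen
  exact (le_foldl_max (bb.map (fun b => b.length)) 0).2 b.length (List.mem_map_of_mem hb)

theorem exists_long_of_lt_maxLen (bb : List (List Int)) (pos : Nat) (h : pos < pvMaxLen bb) :
    ∃ b ∈ bb, pos < b.length := by
  by_contra hc
  push_neg at hc
  have : pvMaxLen bb ≤ pos := by
    unfold pvMaxLen
    apply foldl_max_le _ _ _ (Nat.zero_le _)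
    intro x hx
    obtain ⟨b, hb, rfl⟩ := List.mem_map.1 hx
    exact hc b hb
  omega

theorem cand_nil_of_ge (bb : List (List Int)) (pos : Nat) (h : pvMaxLen bb ≤ pos) :
    pvCand bb pos = [] := by
  rw [pvCand, List.filterMap_eq_nil_iff]
  intro b hb
  exact List.getElem?_eq_none (le_trans (length_le_maxLen bb b hb) h)

theorem cand_ne_nil (bb : List (List Int)) (pos : Nat) (h : pos < pvMaxLen bb) :
    pvCand bb pos ≠ [] := by
  obtain ⟨b, hb, hlt⟩ := exists_long_of_lt_maxLen bb pos h
  refine List.ne_nil_of_mem (a := b[pos]) (List.mem_filterMap.2 ⟨b, hb, ?_⟩)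
  simp [List.getElem?_eq_getElem hlt]

theorem maxLen_snoc (bb : List (List Int)) (b : List Int) :
    pvMaxLen (bb ++ [b]) = Nat.max (pvMaxLen bb) b.length := by
  simp [pvMaxLen, List.foldl_append]

theorem cand_snoc (bb : List (List Int)) (b : List Int) (pos : Nat) :
    pvCand (bb ++ [b]) pos = pvCand bb pos ++ [b].filterMap (fun b => b[pos]?) := by
  simp [pvCand, List.filterMap_append]

theorem nat_max_eq (a b : Nat) : Nat.max a b = a + (b - a) := by
  cases Nat.le_total a b <;> simp [Nat.max_eq_left, Nat.max_eq_right, *]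

theorem nat_min_eq (a b : Nat) : min a b = a - (a - b) := by
  cases Nat.le_total a b <;> simp [Nat.min_eq_left, Nat.min_eq_right, *] <;> omega

theorem tallies_length (bb : List (List Int)) : (pvTallies bb).length = pvMaxLen bb := by
  simp [pvTallies]

theorem tallies_get (bb : List (List Int)) (pos : Nat) (h : pos < (pvTallies bb).length) :
    (pvTallies bb)[pos] = PySem.Dict.counter (pvCand bb pos) := by
  simp [pvTallies]

theorem padded_get (bb : List (List Int)) (b : List Int) (pos : Nat)
    (h : pos < (pvTallies bb ++
      List.replicate (b.length - (pvTallies bb).length) PySem.Dict.empty).length) :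
    (pvTallies bb ++
      List.replicate (b.length - (pvTallies bb).length) PySem.Dict.empty)[pos] =
      PySem.Dict.counter (pvCand bb pos) := by
  by_cases hpm : pos < (pvTallies bb).length
  · rw [List.getElem_append_left hpm]
    exact tallies_get bb pos hpm
  · rw [List.getElem_append_right (Nat.le_of_not_lt hpm)]
    rw [List.getElem_replicate, cand_nil_of_ge bb pos (by rw [← tallies_length bb]; omega)]
    rfl

theorem tallies_snoc (bb : List (List Int)) (b : List Int) :
    pvAddBurst (pvTallies bb) b = pvTallies (bb ++ [b]) := by
  have hPlen : (pvTallies bb ++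
      List.replicate (b.length - (pvTallies bb).length) PySem.Dict.empty).length =
      Nat.max (pvMaxLen bb) b.length := by
    rw [List.length_append, List.length_replicate, tallies_length, nat_max_eq]
  have hzlen : (List.zipWith pvUpdate
      (pvTallies bb ++ List.replicate (b.length - (pvTallies bb).length) PySem.Dict.empty)
      b).length = b.length := by
    rw [List.length_zipWith, hPlen, nat_min_eq, nat_max_eq]
    omega
  simp only [pvAddBurst]
  apply List.ext_getElem
  · rw [List.length_append, hzlen, List.length_drop, hPlen, tallies_length, maxLen_snoc, nat_max_eq]
    omega
  · intro pos h1 h2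
    have hpos : pos < Nat.max (pvMaxLen bb) b.length := by
      rw [tallies_length, maxLen_snoc] at h2
      rw [nat_max_eq]
      rw [nat_max_eq] at h2
      omega
    rw [tallies_get _ _ h2]
    by_cases hpb : pos < b.length
    · rw [List.getElem_append_left (by rw [hzlen]; omega)]
      rw [List.getElem_zipWith, padded_get, cand_snoc]
      have hone : [b].filterMap (fun b => b[pos]?) = [b[pos]] := by
        simp [List.getElem?_eq_getElem hpb]
      rw [hone, counter_snoc]
    · rw [List.getElem_append_right (by rw [hzlen]; omega)]
      rw [List.getElem_drop, padded_get]
      have hidx : b.length + (pos - (List.zipWith pvUpdate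
          (pvTallies bb ++ List.replicate (b.length - (pvTallies bb).length) PySem.Dict.empty)
          b).length) = pos := by
        rw [hzlen]; omega
      rw [hidx, cand_snoc]
      have hnone : [b].filterMap (fun b => b[pos]?) = [] := by
        simp [List.getElem?_eq_none (by omega : b.length ≤ pos)]
      rw [hnone, List.append_nil]

theorem foldl_tallies (bb : List (List Int)) :
    bb.foldl pvAddBurst [] = pvTallies bb := by
  induction bb using List.reverseRecOn with
  | nil => simp [pvTallies, pvMaxLen]
  | append_singleton bbs b ih =>
    rw [List.foldl_append, List.foldl_cons, List.foldl_nil, ih, tallies_snoc]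

-- the fold behind most_common(1)/max keeps the start unless a strictly larger count appears
theorem fold_best_cases (ps : List (Int × Int)) (p : Int × Int) :
    ps.foldl (fun best q => if best.2 < q.2 then q else best) p = p ∨
      p.2 < (ps.foldl (fun best q => if best.2 < q.2 then q else best) p).2 := by
  induction ps generalizing p with
  | nil => exact Or.inl rfl
  | cons q t ih =>
    rw [List.foldl_cons]
    by_cases h : p.2 < q.2
    · rw [if_pos h]
      rcases ih q with h2 | h2
      · rw [h2]; exact Or.inr h
      · exact Or.inr (lt_trans h h2)
    · rw [if_neg h]; exact ih p

theorem argmax_eq_mc (c : List Int) : pyArgmax (PySem.Dict.counter c) = (pyMostCommon1 c).1 := by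
  unfold pyArgmax pyMostCommon1
  cases h : (PySem.Dict.counter c).items <;> simp

theorem mc_fst_of_lt_two (a : Int) (rest : List Int)
    (h : (pyMostCommon1 (a :: rest)).2 < 2) : (pyMostCommon1 (a :: rest)).1 = a := by
  have hitems : (PySem.Dict.counter (a :: rest)).items =
      (a, (((a :: rest).count a : Int))) ::
        (PySem.Set.discard (PySem.Set.ofList rest) a).map
          (fun k => (k, ((a :: rest).count k : Int))) := by
    rw [PySem.Dict.items_counter, PySem.Set.ofList_cons, List.map_cons]
  have hmc : pyMostCommon1 (a :: rest) =
      ((PySem.Set.discard (PySem.Set.ofList rest) a).map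
        (fun k => (k, ((a :: rest).count k : Int)))).foldl
        (fun best q => if best.2 < q.2 then q else best)
        (a, (((a :: rest).count a : Int))) := by
    unfold pyMostCommon1
    rw [hitems]
  have hcnt : (1 : Int) ≤ ((a :: rest).count a : Int) := by
    have : 1 ≤ (a :: rest).count a := by simp [List.count_cons]
    exact_mod_cast this
  rw [hmc] at h ⊢
  rcases fold_best_cases
      ((PySem.Set.discard (PySem.Set.ofList rest) a).map
        (fun k => (k, ((a :: rest).count k : Int))))
      (a, (((a :: rest).count a : Int))) with hcase | hcase
  · rw [hcase]
  · simp only at hcase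
    omega

theorem voteA_eq (c : List Int) (h : c ≠ []) : pvVoteA c = [(pyMostCommon1 c).1] := by
  match c with
  | [a] =>
    simp only [pvVoteA, pyMostCommon1]
    norm_num [PySem.Dict.items_counter, PySem.Set.ofList_cons, PySem.Set.ofList_nil,
      PySem.Set.discard]
  | [a, b] =>
    by_cases hab : a = b
    · subst hab
      simp only [pvVoteA, pyMostCommon1]
      norm_num [PySem.Dict.items_counter, PySem.Set.ofList_cons, PySem.Set.ofList_nil,
        PySem.Set.discard]
      all_goals simp
    · simp only [pvVoteA, pyMostCommon1]
      norm_num [PySem.Dict.items_counter, PySem.Set.ofList_cons, PySem.Set.ofList_nil,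
        PySem.Set.discard, hab, List.count_cons, Ne.symm hab]
      all_goals simp
  | a :: b :: d :: t =>
    simp only [pvVoteA, List.length_cons]
    rw [if_neg (by simp), if_neg (by omega), if_neg (by omega)]
    by_cases hge : (pyMostCommon1 (a :: b :: d :: t)).2 ≥ 2
    · rw [if_pos hge]
    · rw [if_neg hge, mc_fst_of_lt_two a (b :: d :: t) (by omega)]
      simp

-- the inner candidate-collection loop of A computes pvCand
theorem innerA_eq (bb : List (List Int)) (pos : Nat) :
    bb.foldl (fun cs burst => if pos < burst.length then cs ++ [burst.getD pos 0] else cs) [] =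
      pvCand bb pos := by
  have hcand : pvCand bb pos = (bb.filter (fun b => pos < b.length)).map (fun b => b.getD pos 0) := by
    induction bb with
    | nil => simp [pvCand]
    | cons b t ih =>
      by_cases h : pos < b.length
      · simp [pvCand, List.filterMap_cons, List.getElem?_eq_getElem h, List.filter_cons, h,
          List.getD_eq_getElem _ _ h] at ih ⊢
        exact ih
      · simp [pvCand, List.filterMap_cons, List.getElem?_eq_none (l := b) (Nat.le_of_not_lt h), List.filter_cons, h] at ih ⊢
        exact ih
  rw [hcand]
  have := PySem.List.foldl_append_if (l := bb) (acc := ([] : List Int))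
    (p := fun b => decide (pos < b.length)) (f := fun b => b.getD pos 0)
  simp only [decide_eq_true_eq] at this
  simpa using this

theorem bodyA_eq (bb : List (List Int)) (acc : List Int) (l : List Nat) :
    l.foldl (fun voted pos =>
      let candidates : List Int :=
        bb.foldl (fun cs burst =>
          if pos < burst.length then cs ++ [burst.getD pos 0] else cs) []
      if candidates = [] then voted
      else if candidates.length = 1 then voted ++ [candidates.headD 0]
      else if candidates.length = 2 then voted ++ [candidates.headD 0]
      else if (pyMostCommon1 candidates).2 ≥ 2 then voted ++ [(pyMostCommon1 candidates).1]
      else voted ++ [candidates.headD 0]) acc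
    = acc ++ l.flatMap (fun pos => pvVoteA (pvCand bb pos)) := by
  have hbody : (fun (voted : List Int) (pos : Nat) =>
      let candidates : List Int :=
        bb.foldl (fun cs burst =>
          if pos < burst.length then cs ++ [burst.getD pos 0] else cs) []
      if candidates = [] then voted
      else if candidates.length = 1 then voted ++ [candidates.headD 0]
      else if candidates.length = 2 then voted ++ [candidates.headD 0]
      else if (pyMostCommon1 candidates).2 ≥ 2 then voted ++ [(pyMostCommon1 candidates).1]
      else voted ++ [candidates.headD 0])
      = fun voted pos => voted ++ pvVoteA (pvCand bb pos) := by
    funext voted pos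
    rw [innerA_eq]
    simp only [pvVoteA]
    split_ifs <;> simp
  rw [hbody, PySem.List.foldl_append_eq_flatMap]

theorem flatMap_singleton_eq_map (l : List Nat) (f : Nat → List Int) (g : Nat → Int)
    (h : ∀ x ∈ l, f x = [g x]) : l.flatMap f = l.map g := by
  induction l with
  | nil => rfl
  | cons x t ih =>
    rw [List.flatMap_cons, List.map_cons, h x List.mem_cons_self,
      ih (fun y hy => h y (List.mem_cons_of_mem _ hy))]
    rfl

-- ===== VERDICT (by name: the statement is the Claim_ definition above) =====
theorem vote_on_bytes_py_spec : Claim_equal_vote_on_bytes_py := by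
  intro bb _
  show vote_on_bytes_py bb = vote_on_bytes_py_alt bb
  unfold vote_on_bytes_py vote_on_bytes_py_alt
  rw [foldl_tallies]
  by_cases hnil : bb = []
  · subst hnil; simp [pvTallies, pvMaxLen]
  · rw [if_neg hnil]
    have hA := bodyA_eq bb [] (List.range (pvMaxLen bb))
    simp only [List.nil_append] at hA
    rw [show ((bb.map (fun b => b.length)).foldl Nat.max 0) = pvMaxLen bb from rfl, hA]
    rw [pvTallies, List.map_map]
    apply flatMap_singleton_eq_map
    intro pos hpos
    rw [voteA_eq _ (cand_ne_nil bb pos (List.mem_range.1 hpos))]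
    simp [Function.comp_def, argmax_eq_mc]
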